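-- pv_equiv track=rewrite | github.com/ninjha01/advent2021 | six/day6.py | simulate_fish
-- ===== SOURCE A (Python) =====
-- from typing import Dict, List, Literal, Set, Tuple
--
-- def simulate_fish(puzzle: List[int], num_of_days: int):
--     fish_count_map = {k: 0 for k in range(0, 9)}
--     for timer in puzzle:
--         fish_count_map[timer] += 1
--     for i in range(num_of_days):
--         new_fish_map = {k: 0 for k in range(0, 9)}
--         for timer, count in fish_count_map.items():
--             if timer == 0:
--                 # reset fish timer
--                 new_fish_map[8] += count
--                 # Create baby fish
--                 new_fish_map[6] += count
--             else:
--                 new_fish_map[timer - 1] += count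
--         fish_count_map = new_fish_map
--     return sum(fish_count_map.values())
-- ===== SOURCE B (Python) =====
-- def simulate_fish(puzzle, num_of_days):
--     fish_count_map = {k: 0 for k in range(0, 9)}
--     for timer in puzzle:
--         fish_count_map[timer] += 1
--     c = [fish_count_map[k] for k in range(0, 9)]
--     for day in range(num_of_days):
--         # the bucket at day % 9 holds the fish whose timer is 0 today;
--         # leaving it in place "rotates" it to timer 8, and its count is
--         # added at (day + 7) % 9, the slot that will be timer 6 tomorrow
--         c[(day + 7) % 9] += c[day % 9]
--     return sum(c)
-- ===== Notes on version B (the rewrite author's own statement) =====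
-- stated objective: alternative
-- what changed: B replaces A's per-day rebuild of a fresh 9-bucket dict (scanning all 9 buckets each day) with a fixed 9-slot circular buffer: each day only one slot is updated (c[(day+7)%9] += c[day%9]), the rotation being implicit in the moving index.
import Mathlib
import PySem

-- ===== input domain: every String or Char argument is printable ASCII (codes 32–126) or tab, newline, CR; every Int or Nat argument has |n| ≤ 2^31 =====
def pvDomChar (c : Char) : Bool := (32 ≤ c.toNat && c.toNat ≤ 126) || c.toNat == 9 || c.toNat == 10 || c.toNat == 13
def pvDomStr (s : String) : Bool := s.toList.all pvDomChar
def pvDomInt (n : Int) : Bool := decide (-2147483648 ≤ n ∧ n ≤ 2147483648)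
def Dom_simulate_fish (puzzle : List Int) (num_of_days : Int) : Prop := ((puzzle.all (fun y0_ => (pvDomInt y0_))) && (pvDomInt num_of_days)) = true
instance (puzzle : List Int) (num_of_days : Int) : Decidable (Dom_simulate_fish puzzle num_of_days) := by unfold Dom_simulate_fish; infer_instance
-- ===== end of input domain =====

-- B replaces A's per-day rebuild of a 9-bucket dict with a fixed circular buffer
-- whose rotation is implicit in the moving day index (alternative algorithm).


-- ===== PORT A =====
-- {k: 0 for k in range(0, 9)}
def pvInitMap : PySem.Dict Int Int :=
  (PySem.List.pyRange 0 9 1).foldl (fun d k => d.insert k 0) PySem.Dict.empty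

-- fish_count_map[timer] += 1  (read raises KeyError on a missing key: none = excluded by Pre_)
def pvCountStep (d : PySem.Dict Int Int) (timer : Int) : PySem.Dict Int Int :=
  match d.get? timer with
  | some v => d.insert timer (v + 1)
  | none => d

-- one day of A: rebuild new_fish_map from fish_count_map.items()
def pvDayA (fcm : PySem.Dict Int Int) : PySem.Dict Int Int :=
  fcm.items.foldl (fun n p =>
    if p.1 == 0 then
      let n := n.insert 8 (n.getD 8 0 + p.2)
      n.insert 6 (n.getD 6 0 + p.2)
    else
      n.insert (p.1 - 1) (n.getD (p.1 - 1) 0 + p.2)) pvInitMap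

def simulate_fish (puzzle : List Int) (num_of_days : Int) : Int :=
  ((PySem.List.pyRange 0 num_of_days 1).foldl (fun d _i => pvDayA d)
    (puzzle.foldl pvCountStep pvInitMap)).values.sum

-- ===== PORT B =====
-- c[(day + 7) % 9] += c[day % 9]  (both indices are nonnegative and < 9, so plain indexing)
def pvDayB (c : List Int) (day : Int) : List Int :=
  let i := (PySem.Int.mod (day + 7) 9).toNat
  c.set i (c.getD i 0 + c.getD (PySem.Int.mod day 9).toNat 0)

def simulate_fish_alt (puzzle : List Int) (num_of_days : Int) : Int :=
  ((PySem.List.pyRange 0 num_of_days 1).foldl pvDayB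
    ((PySem.List.pyRange 0 9 1).map
      (fun k => (puzzle.foldl pvCountStep pvInitMap).getD k 0))).sum

-- ===== PRECONDITION & SPEC =====
-- Pre_ excludes exactly the inputs on which A (and B alike) raises KeyError:
-- a timer outside range(9) is not a key of the 9-bucket dict.
def Pre_simulate_fish (puzzle : List Int) (num_of_days : Int) : Prop :=
  ∀ x ∈ puzzle, 0 ≤ x ∧ x < 9

instance (puzzle : List Int) (num_of_days : Int) : Decidable (Pre_simulate_fish puzzle num_of_days) := by
  unfold Pre_simulate_fish; infer_instance

def pvWitness_simulate_fish : List Int × Int := ([3, 4, 3, 1, 2], 18)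

def Spec_simulate_fish (puzzle : List Int) (num_of_days : Int) (out : Int) : Prop := out = simulate_fish_alt puzzle num_of_days
instance (puzzle : List Int) (num_of_days : Int) (out : Int) : Decidable (Spec_simulate_fish puzzle num_of_days out) := by unfold Spec_simulate_fish; infer_instance

-- ===== CLAIM (what is proved, stated in full; the proofs are below) =====
def Claim_equal_simulate_fish : Prop := ∀ (puzzle : List Int) (num_of_days : Int), Dom_simulate_fish puzzle num_of_days → Pre_simulate_fish puzzle num_of_days → Spec_simulate_fish puzzle num_of_days (simulate_fish puzzle num_of_days)

-- ===== LEMMAS AND PROOFS =====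

-- the common mathematical state: the nine bucket counts
structure F9 where
  a0 : Int
  a1 : Int
  a2 : Int
  a3 : Int
  a4 : Int
  a5 : Int
  a6 : Int
  a7 : Int
  a8 : Int
deriving DecidableEq, Repr

def dict9 (t : F9) : PySem.Dict Int Int :=
  PySem.Dict.mk [(0, t.a0), (1, t.a1), (2, t.a2), (3, t.a3), (4, t.a4),
                 (5, t.a5), (6, t.a6), (7, t.a7), (8, t.a8)]

def stepF (t : F9) : F9 :=
  ⟨t.a1, t.a2, t.a3, t.a4, t.a5, t.a6, t.a7 + t.a0, t.a8, t.a0⟩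

def sumF (t : F9) : Int :=
  t.a0 + t.a1 + t.a2 + t.a3 + t.a4 + t.a5 + t.a6 + t.a7 + t.a8

-- the circular buffer that holds t rotated right by j positions (j < 9)
def rotL (j : Nat) (t : F9) : List Int :=
  match j with
  | 0 => [t.a0, t.a1, t.a2, t.a3, t.a4, t.a5, t.a6, t.a7, t.a8]
  | 1 => [t.a8, t.a0, t.a1, t.a2, t.a3, t.a4, t.a5, t.a6, t.a7]
  | 2 => [t.a7, t.a8, t.a0, t.a1, t.a2, t.a3, t.a4, t.a5, t.a6]
  | 3 => [t.a6, t.a7, t.a8, t.a0, t.a1, t.a2, t.a3, t.a4, t.a5]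
  | 4 => [t.a5, t.a6, t.a7, t.a8, t.a0, t.a1, t.a2, t.a3, t.a4]
  | 5 => [t.a4, t.a5, t.a6, t.a7, t.a8, t.a0, t.a1, t.a2, t.a3]
  | 6 => [t.a3, t.a4, t.a5, t.a6, t.a7, t.a8, t.a0, t.a1, t.a2]
  | 7 => [t.a2, t.a3, t.a4, t.a5, t.a6, t.a7, t.a8, t.a0, t.a1]
  | 8 => [t.a1, t.a2, t.a3, t.a4, t.a5, t.a6, t.a7, t.a8, t.a0]
  | _ => []

lemma init_eq : pvInitMap = dict9 ⟨0, 0, 0, 0, 0, 0, 0, 0, 0⟩ := by decide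

lemma countStep_shape (x : Int) (hx : 0 ≤ x ∧ x < 9) (t : F9) :
    ∃ t', pvCountStep (dict9 t) x = dict9 t' := by
  obtain ⟨h0, h1⟩ := hx
  interval_cases x
  · exact ⟨⟨t.a0 + 1, t.a1, t.a2, t.a3, t.a4, t.a5, t.a6, t.a7, t.a8⟩, rfl⟩
  · exact ⟨⟨t.a0, t.a1 + 1, t.a2, t.a3, t.a4, t.a5, t.a6, t.a7, t.a8⟩, rfl⟩
  · exact ⟨⟨t.a0, t.a1, t.a2 + 1, t.a3, t.a4, t.a5, t.a6, t.a7, t.a8⟩, rfl⟩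
  · exact ⟨⟨t.a0, t.a1, t.a2, t.a3 + 1, t.a4, t.a5, t.a6, t.a7, t.a8⟩, rfl⟩
  · exact ⟨⟨t.a0, t.a1, t.a2, t.a3, t.a4 + 1, t.a5, t.a6, t.a7, t.a8⟩, rfl⟩
  · exact ⟨⟨t.a0, t.a1, t.a2, t.a3, t.a4, t.a5 + 1, t.a6, t.a7, t.a8⟩, rfl⟩
  · exact ⟨⟨t.a0, t.a1, t.a2, t.a3, t.a4, t.a5, t.a6 + 1, t.a7, t.a8⟩, rfl⟩
  · exact ⟨⟨t.a0, t.a1, t.a2, t.a3, t.a4, t.a5, t.a6, t.a7 + 1, t.a8⟩, rfl⟩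
  · exact ⟨⟨t.a0, t.a1, t.a2, t.a3, t.a4, t.a5, t.a6, t.a7, t.a8 + 1⟩, rfl⟩

lemma count_shape (puzzle : List Int) (hp : ∀ x ∈ puzzle, 0 ≤ x ∧ x < 9) :
    ∀ t, ∃ t', puzzle.foldl pvCountStep (dict9 t) = dict9 t' := by
  induction puzzle with
  | nil => exact fun t => ⟨t, rfl⟩
  | cons x xs ih =>
    intro t
    obtain ⟨t1, h1⟩ := countStep_shape x (hp x (List.mem_cons_self)) t
    simpa [h1] using ih (fun y hy => hp y (List.mem_cons_of_mem _ hy)) t1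

lemma dayA_eq (t : F9) : pvDayA (dict9 t) = dict9 (stepF t) := by
  unfold pvDayA
  rw [init_eq]
  show List.foldl _ (dict9 ⟨0, 0, 0, 0, 0, 0, 0, 0, 0⟩)
      [(0, t.a0), (1, t.a1), (2, t.a2), (3, t.a3), (4, t.a4),
       (5, t.a5), (6, t.a6), (7, t.a7), (8, t.a8)] = _
  simp [dict9, stepF, PySem.Dict.insert, PySem.Dict.getD, PySem.Dict.get?, PySem.Dict.contains]
  ring

lemma loopA_eq (l : List Int) : ∀ t,
    l.foldl (fun d _i => pvDayA d) (dict9 t) = dict9 (stepF^[l.length] t) := by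
  induction l with
  | nil => intro t; rfl
  | cons x xs ih =>
    intro t
    simp only [List.foldl_cons, List.length_cons, dayA_eq, Function.iterate_succ_apply]
    exact ih (stepF t)

lemma dayB_eq (d : Nat) (t : F9) :
    pvDayB (rotL (d % 9) t) (d : Int) = rotL ((d + 1) % 9) (stepF t) := by
  have e1 : PySem.Int.mod ((d : Int) + 7) 9 = (((d + 7) % 9 : Nat) : Int) := by
    rw [show ((d : Int) + 7) = (((d + 7 : Nat) : Nat) : Int) by push_cast; ring]
    simpa using PySem.Int.mod_natCast (d + 7) 9
  have e2 : PySem.Int.mod (d : Int) 9 = ((d % 9 : Nat) : Int) := by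
    simpa using PySem.Int.mod_natCast d 9
  unfold pvDayB
  rw [e1, e2]
  simp only [Int.toNat_natCast]
  rcases (show d % 9 = 0 ∨ d % 9 = 1 ∨ d % 9 = 2 ∨ d % 9 = 3 ∨ d % 9 = 4 ∨ d % 9 = 5 ∨
      d % 9 = 6 ∨ d % 9 = 7 ∨ d % 9 = 8 by omega) with h|h|h|h|h|h|h|h|h
  · rw [h, show (d + 7) % 9 = 7 by omega, show (d + 1) % 9 = 1 by omega]; rfl
  · rw [h, show (d + 7) % 9 = 8 by omega, show (d + 1) % 9 = 2 by omega]; rfl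
  · rw [h, show (d + 7) % 9 = 0 by omega, show (d + 1) % 9 = 3 by omega]; rfl
  · rw [h, show (d + 7) % 9 = 1 by omega, show (d + 1) % 9 = 4 by omega]; rfl
  · rw [h, show (d + 7) % 9 = 2 by omega, show (d + 1) % 9 = 5 by omega]; rfl
  · rw [h, show (d + 7) % 9 = 3 by omega, show (d + 1) % 9 = 6 by omega]; rfl
  · rw [h, show (d + 7) % 9 = 4 by omega, show (d + 1) % 9 = 7 by omega]; rfl
  · rw [h, show (d + 7) % 9 = 5 by omega, show (d + 1) % 9 = 8 by omega]; rfl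
  · rw [h, show (d + 7) % 9 = 6 by omega, show (d + 1) % 9 = 0 by omega]; rfl

lemma loopB_eq (n : Nat) : ∀ (d : Nat) (t : F9),
    (PySem.List.pyRange (d : Int) ((d + n : Nat) : Int) 1).foldl pvDayB (rotL (d % 9) t)
      = rotL ((d + n) % 9) (stepF^[n] t) := by
  induction n with
  | zero => intro d t; simp [PySem.List.pyRange_one_eq_nil]
  | succ n ih =>
    intro d t
    rw [PySem.List.pyRange_one_cons (by push_cast; omega)]
    rw [List.foldl_cons, dayB_eq]
    have : ((d : Int) + 1) = ((d + 1 : Nat) : Int) := by push_cast; ring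
    rw [this]
    have h2 : ((d + (n + 1) : Nat) : Int) = ((d + 1 + n : Nat) : Int) := by push_cast; ring
    rw [h2]
    have := ih (d + 1) (stepF t)
    rw [this]
    have h3 : (d + 1 + n) % 9 = (d + (n + 1)) % 9 := by omega
    rw [h3, Function.iterate_succ_apply]

lemma values_dict9 (t : F9) : (dict9 t).values.sum = sumF t := by
  simp [dict9, sumF, PySem.Dict.values]; ring

lemma sum_rotL (j : Nat) (hj : j < 9) (t : F9) : (rotL j t).sum = sumF t := by
  interval_cases j <;> simp [rotL, sumF] <;> ring

lemma extract_eq (t : F9) :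
    (PySem.List.pyRange 0 9 1).map (fun k => (dict9 t).getD k 0) = rotL 0 t := by
  rfl

-- ===== VERDICT (by name: the statement is the Claim_ definition above) =====
theorem simulate_fish_spec : Claim_equal_simulate_fish := by
  intro puzzle num_of_days _hdom hpre
  unfold Spec_simulate_fish simulate_fish simulate_fish_alt
  rw [init_eq]
  obtain ⟨t, ht⟩ := count_shape puzzle hpre ⟨0, 0, 0, 0, 0, 0, 0, 0, 0⟩
  rw [ht, extract_eq]
  rcases (show 0 ≤ num_of_days ∨ num_of_days < 0 by omega) with h | h
  · have hn : num_of_days = ((num_of_days.toNat : Nat) : Int) := by omega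
    rw [hn, loopA_eq, values_dict9]
    have hb := loopB_eq num_of_days.toNat 0 t
    simp only [Nat.cast_zero, Nat.zero_add, Nat.zero_mod] at hb
    rw [hb, sum_rotL _ (Nat.mod_lt _ (by norm_num)), PySem.List.length_pyRange_one]
    simp only [sub_zero]
    rw [show ((num_of_days.toNat : Int)).toNat = num_of_days.toNat by omega]
  · rw [PySem.List.pyRange_one_eq_nil (by omega), List.foldl_nil, List.foldl_nil,
        values_dict9, sum_rotL 0 (by norm_num)]
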